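-- pv_equiv track=rewrite | github.com/eliottcassidy2000/math | 04-computation/overlap_cross_length.py | enumerate_cycle_vertex_sets
-- ===== SOURCE A (Python) =====
-- from itertools import combinations
--
-- def has_ham_cycle(A, verts):
--     """Check if vertex subset has a directed Hamiltonian cycle."""
--     k = len(verts)
--     if k == 3:
--         a, b, c = verts
--         return (A[a][b] * A[b][c] * A[c][a] + A[a][c] * A[c][b] * A[b][a]) > 0
--     dp = set()
--     dp.add((1 << 0, 0))
--     for mask in range(1, 1 << k):
--         if not (mask & 1):
--             continue
--         for v in range(k):
--             if not (mask & (1 << v)):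
--                 continue
--             if (mask, v) not in dp:
--                 continue
--             for w in range(k):
--                 if mask & (1 << w):
--                     continue
--                 if A[verts[v]][verts[w]]:
--                     dp.add((mask | (1 << w), w))
--     full = (1 << k) - 1
--     for v in range(1, k):
--         if (full, v) in dp and A[verts[v]][verts[0]]:
--             return True
--     return False
--
-- def enumerate_cycle_vertex_sets(A, p, max_k=None):
--     """Enumerate all vertex sets that support a directed Hamiltonian cycle, by length."""
--     if max_k is None:
--         max_k = p
--     by_k = {}
--     for k in range(3, max_k + 1, 2):
--         sets_k = []
--         for subset in combinations(range(p), k):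
--             if has_ham_cycle(A, list(subset)):
--                 sets_k.append(frozenset(subset))
--         by_k[k] = sets_k
--     return by_k
-- ===== SOURCE B (Python) =====
-- from itertools import combinations
--
-- def _has_cycle_dfs(A, verts):
--     k = len(verts)
--     if k == 3:
--         a, b, c = verts
--         return (A[a][b] * A[b][c] * A[c][a] + A[a][c] * A[c][b] * A[b][a]) > 0
--     def dfs(cur, remaining):
--         if not remaining:
--             return bool(A[verts[cur]][verts[0]])
--         for i in range(len(remaining)):
--             w = remaining[i]
--             if A[verts[cur]][verts[w]]:
--                 if dfs(w, remaining[:i] + remaining[i + 1:]):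
--                     return True
--         return False
--     return dfs(0, list(range(1, k)))
--
-- def enumerate_cycle_vertex_sets(A, p, max_k=None):
--     if max_k is None:
--         max_k = p
--     by_k = {}
--     for k in range(3, max_k + 1, 2):
--         sets_k = []
--         for subset in combinations(range(p), k):
--             if _has_cycle_dfs(A, list(subset)):
--                 sets_k.append(frozenset(subset))
--         by_k[k] = sets_k
--     return by_k
-- ===== Notes on version B (the rewrite author's own statement) =====
-- stated objective: alternative
-- what changed: The Held-Karp bitmask DP inside the per-subset Hamiltonian-cycle check (a set of (mask, endpoint) states grown over all masks) is replaced by a recursive depth-first backtracking search that extends a path from vertex position 0 through the unvisited positions and closes the cycle; the k==3 product branch and the combinations enumeration are kept unchanged.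
import Mathlib
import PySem

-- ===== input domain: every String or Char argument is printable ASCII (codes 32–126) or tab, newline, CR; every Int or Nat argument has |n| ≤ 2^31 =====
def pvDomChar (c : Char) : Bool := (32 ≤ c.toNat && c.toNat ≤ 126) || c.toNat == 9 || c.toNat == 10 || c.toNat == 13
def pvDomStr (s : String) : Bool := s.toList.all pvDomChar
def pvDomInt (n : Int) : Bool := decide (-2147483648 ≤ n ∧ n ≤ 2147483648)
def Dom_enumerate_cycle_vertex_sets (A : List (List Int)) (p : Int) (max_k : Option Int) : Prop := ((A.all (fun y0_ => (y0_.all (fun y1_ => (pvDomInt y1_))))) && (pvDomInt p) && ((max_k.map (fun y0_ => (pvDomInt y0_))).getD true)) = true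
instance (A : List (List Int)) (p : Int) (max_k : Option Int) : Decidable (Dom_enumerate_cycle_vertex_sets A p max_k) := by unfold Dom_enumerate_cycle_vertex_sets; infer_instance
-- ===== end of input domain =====

-- B replaces the Held–Karp bitmask DP inside the per-subset Hamiltonian-cycle test by a recursive
-- depth-first backtracking search (path extension from vertex position 0); the k == 3 branch and the
-- enumeration over combinations are unchanged.  Objective: alternative algorithm, same results.

-- ===== PORT A =====

-- A[i][j] (both programs only evaluate it on in-range indices inside Pre_; out of range Python raises,
-- here the total form defaults to 0 — nothing is claimed there)
def pvAt2 (A : List (List Int)) (i j : Int) : Int :=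
  (PySem.List.pyGet? ((PySem.List.pyGet? A i).getD []) j).getD 0

-- the k == 3 branch of has_ham_cycle, shared verbatim by both Pythons
def pvHam3 (A : List (List Int)) (verts : List Int) : Bool :=
  let a := verts.getD 0 0
  let b := verts.getD 1 0
  let c := verts.getD 2 0
  decide (0 < pvAt2 A a b * pvAt2 A b c * pvAt2 A c a + pvAt2 A a c * pvAt2 A c b * pvAt2 A b a)

-- truthiness of A[verts[v]][verts[w]] (positions v w are always < len(verts) at use sites)
def pvEdge (A : List (List Int)) (verts : List Int) (v w : Nat) : Bool :=
  pvAt2 A (verts.getD v 0) (verts.getD w 0) != 0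

-- inner 'for w in range(k)' loop of A's DP
def pvDpW (e : Nat → Nat → Bool) (k mask v : Nat) (dp : PySem.Set (Nat × Nat)) : PySem.Set (Nat × Nat) :=
  (List.range k).foldl (fun dp w =>
    if mask.testBit w then dp
    else if e v w then PySem.Set.add dp (mask ||| 2 ^ w, w)
    else dp) dp

-- 'for v in range(k)' loop of A's DP
def pvDpV (e : Nat → Nat → Bool) (k mask : Nat) (dp : PySem.Set (Nat × Nat)) : PySem.Set (Nat × Nat) :=
  (List.range k).foldl (fun dp v =>
    if ¬ mask.testBit v then dp
    else if (mask, v) ∉ dp then dp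
    else pvDpW e k mask v dp) dp

-- 'for mask in range(1, 1 << k)' over the first M masks (the port uses M = 2^k - 1, i.e. all of them)
def pvDpPrefix (e : Nat → Nat → Bool) (k M : Nat) : PySem.Set (Nat × Nat) :=
  (List.range' 1 M).foldl (fun dp mask =>
    if ¬ mask.testBit 0 then dp else pvDpV e k mask dp)
    (PySem.Set.add PySem.Set.empty (1, 0))

-- has_ham_cycle of A (k = len(verts) inlined)
def pvHamDP (A : List (List Int)) (verts : List Int) : Bool :=
  if verts.length == 3 then pvHam3 A verts
  else
    (List.range' 1 (verts.length - 1)).any (fun v =>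
      decide ((2 ^ verts.length - 1, v) ∈
        pvDpPrefix (pvEdge A verts) verts.length (2 ^ verts.length - 1)) &&
      pvEdge A verts v 0)

def enumerate_cycle_vertex_sets (A : List (List Int)) (p : Int) (max_k : Option Int) : List (Int × List (List Int)) :=
  (PySem.List.pyRange 3 (max_k.getD p + 1) 2).map (fun k =>
    (k, (PySem.List.combinations (PySem.List.pyRange 0 p 1) k.toNat).foldl
          (fun acc subset => if pvHamDP A subset then acc ++ [PySem.Set.ofList subset] else acc) []))

-- ===== PORT B =====

-- recursive backtracking search of Source B: dfs(cur, remaining); the 'for i in range(len(remaining))'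
-- loop is rendered with an accumulated prefix, so remaining[:i] + remaining[i+1:] is pre ++ rest
mutual
def pvDfs (e : Nat → Nat → Bool) (cur : Nat) (remaining : List Nat) : Bool :=
  match remaining with
  | [] => e cur 0
  | r :: rs => pvDfsTry e cur [] (r :: rs)
termination_by (remaining.length, remaining.length + 1)
decreasing_by
  simp only [List.length_nil, Nat.zero_add]
  apply Prod.Lex.right
  omega

def pvDfsTry (e : Nat → Nat → Bool) (cur : Nat) (pre suf : List Nat) : Bool :=
  match suf with
  | [] => false
  | w :: rest =>
    if e cur w && pvDfs e w (pre ++ rest) then true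
    else pvDfsTry e cur (pre ++ [w]) rest
termination_by (pre.length + suf.length, suf.length)
decreasing_by
  · apply Prod.Lex.left
    simp only [List.length_append, List.length_cons]
    omega
  · have hEq : (pre ++ [w]).length + rest.length = pre.length + (w :: rest).length := by
      simp only [List.length_append, List.length_cons, List.length_nil]
      omega
    rw [hEq]
    apply Prod.Lex.right
    simp
end

-- _has_cycle_dfs of Source B
def pvHamDFS (A : List (List Int)) (verts : List Int) : Bool :=
  if verts.length == 3 then pvHam3 A verts
  else pvDfs (pvEdge A verts) 0 (List.range' 1 (verts.length - 1))

def enumerate_cycle_vertex_sets_alt (A : List (List Int)) (p : Int) (max_k : Option Int) : List (Int × List (List Int)) :=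
  (PySem.List.pyRange 3 (max_k.getD p + 1) 2).map (fun k =>
    (k, (PySem.List.combinations (PySem.List.pyRange 0 p 1) k.toNat).foldl
          (fun acc subset => if pvHamDFS A subset then acc ++ [PySem.Set.ofList subset] else acc) []))

-- ===== PRECONDITION & SPEC =====

-- Pre_ excludes exactly the inputs where Python A raises IndexError: as soon as some k ≥ 3 is
-- enumerated (p ≥ 3 and effective max_k ≥ 3), every off-diagonal entry A[i][j] with i, j < p is read,
-- so A needs at least p rows, rows 0..p-2 need length ≥ p and row p-1 needs length ≥ p-1.
def Pre_enumerate_cycle_vertex_sets (A : List (List Int)) (p : Int) (max_k : Option Int) : Prop :=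
  max_k.getD p < 3 ∨ p < 3 ∨
    (p.toNat ≤ A.length ∧
      ∀ i < p.toNat, (if i = p.toNat - 1 then p.toNat - 1 else p.toNat) ≤ (A.getD i []).length)
instance (A : List (List Int)) (p : Int) (max_k : Option Int) : Decidable (Pre_enumerate_cycle_vertex_sets A p max_k) := by
  unfold Pre_enumerate_cycle_vertex_sets; infer_instance

def pvWitness_enumerate_cycle_vertex_sets : List (List Int) × Int × Option Int :=
  ([[0, 1, 0], [0, 0, 1], [1, 0, 0]], 3, none)

def Spec_enumerate_cycle_vertex_sets (A : List (List Int)) (p : Int) (max_k : Option Int) (out : List (Int × List (List Int))) : Prop := out = enumerate_cycle_vertex_sets_alt A p max_k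
instance (A : List (List Int)) (p : Int) (max_k : Option Int) (out : List (Int × List (List Int))) : Decidable (Spec_enumerate_cycle_vertex_sets A p max_k out) := by unfold Spec_enumerate_cycle_vertex_sets; infer_instance

-- ===== CLAIM (what is proved, stated in full; the proofs are below) =====
def Claim_equal_enumerate_cycle_vertex_sets : Prop := ∀ (A : List (List Int)) (p : Int) (max_k : Option Int), Dom_enumerate_cycle_vertex_sets A p max_k → Pre_enumerate_cycle_vertex_sets A p max_k → Spec_enumerate_cycle_vertex_sets A p max_k (enumerate_cycle_vertex_sets A p max_k)

-- ===== LEMMAS AND PROOFS =====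

-- paths of A's DP / B's DFS, abstractly: pvReach e k m v m' v' = starting at endpoint v with visited
-- bitmask m, one can extend vertex by vertex (edges e, vertices < k, never revisiting) to (m', v')
inductive pvReach (e : Nat → Nat → Bool) (k : Nat) : Nat → Nat → Nat → Nat → Prop where
  | refl (m v : Nat) : pvReach e k m v m v
  | step {m v m' v' : Nat} (w : Nat) (hw : w < k) (hbit : m.testBit w = false)
      (he : e v w = true) (htail : pvReach e k (m ||| 2 ^ w) w m' v') : pvReach e k m v m' v'

-- reachability from (1, 0) whose every step leaves a source mask ≤ M (= what A's DP knows after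
-- processing masks 1..M)
inductive pvReachB (e : Nat → Nat → Bool) (k M : Nat) : Nat → Nat → Prop where
  | base : pvReachB e k M 1 0
  | step {m v : Nat} (w : Nat) (hm : m ≤ M) (hr : pvReachB e k M m v) (hw : w < k)
      (hbit : m.testBit w = false) (he : e v w = true) : pvReachB e k M (m ||| 2 ^ w) w

theorem pvTestBit_or_pow (m w x : Nat) :
    (m ||| 2 ^ w).testBit x = (m.testBit x || decide (x = w)) := by
  simp [Nat.testBit_or, Nat.testBit_two_pow, eq_comm]

theorem pvTestBit_one (w : Nat) : (1 : Nat).testBit w = decide (w = 0) := by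
  cases w with
  | zero => decide
  | succ n => simp [Nat.testBit_succ]

theorem pvLt_or_pow {m w : Nat} (h : m.testBit w = false) : m < m ||| 2 ^ w := by
  refine lt_of_le_of_ne Nat.left_le_or (fun hEq => ?_)
  have hb := pvTestBit_or_pow m w w
  rw [← hEq, h] at hb
  simp at hb

theorem pvReachB_bit0 {e k M m v} (h : pvReachB e k M m v) : m.testBit 0 = true := by
  induction h with
  | base => decide
  | step w hm hr hw hbit he ih => rw [pvTestBit_or_pow, ih]; simp

theorem pvReachB_bitv {e k M m v} (h : pvReachB e k M m v) : m.testBit v = true := by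
  cases h with
  | base => decide
  | step w hm hr hw hbit he => rw [pvTestBit_or_pow]; simp

theorem pvReachB_vlt {e k M m v} (hk : 1 ≤ k) (h : pvReachB e k M m v) : v < k := by
  cases h with
  | base => omega
  | step w hm hr hw hbit he => exact hw

theorem pvReachB_ne_zero {e k M m v} (h : pvReachB e k M m v) (hm1 : m ≠ 1) : v ≠ 0 := by
  cases h with
  | base => exact absurd rfl hm1
  | step w hm hr hw hbit he =>
      intro hw0
      rw [hw0] at hbit
      rw [pvReachB_bit0 hr] at hbit
      exact absurd hbit (by simp)

theorem pvReachB_lt {e k M m v} (hk : 1 ≤ k) (h : pvReachB e k M m v) : m < 2 ^ k := by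
  induction h with
  | base => exact Nat.one_lt_two_pow (by omega)
  | step w hm hr hw hbit he ih =>
      exact Nat.or_lt_two_pow ih (Nat.pow_lt_pow_right (by norm_num) hw)

theorem pvReachB_mono {e k M M' m v} (hMM : M ≤ M') (h : pvReachB e k M m v) :
    pvReachB e k M' m v := by
  induction h with
  | base => exact .base
  | step w hm hr hw hbit he ih => exact .step w (le_trans hm hMM) ih hw hbit he

theorem pvReach_trans {e k a b c d m v} (h1 : pvReach e k a b c d) :
    pvReach e k c d m v → pvReach e k a b m v := by
  induction h1 with
  | refl => exact id
  | step w hw hbit he htail ih => exact fun h2 => .step w hw hbit he (ih h2)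

theorem pvReach_snoc {e k a b m v w} (h : pvReach e k a b m v) (hw : w < k)
    (hbit : m.testBit w = false) (he : e v w = true) : pvReach e k a b (m ||| 2 ^ w) w :=
  pvReach_trans h (.step w hw hbit he (.refl _ _))

theorem pvReachB_toReach {e k M m v} (h : pvReachB e k M m v) : pvReach e k 1 0 m v := by
  induction h with
  | base => exact .refl _ _
  | step w hm hr hw hbit he ih => exact pvReach_snoc ih hw hbit he

theorem pvReach_toReachB {e k M a b m v} (hk : 1 ≤ k) (hM : 2 ^ k - 2 ≤ M)
    (h : pvReach e k a b m v) : pvReachB e k M a b → pvReachB e k M m v := by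
  induction h with
  | refl => exact id
  | @step a₀ b₀ m' v' w hw hbit he htail ih =>
      intro hab
      have ha1 : a₀ < 2 ^ k := pvReachB_lt hk hab
      have ha2 : a₀ ≠ 2 ^ k - 1 := fun hEq => by
        rw [hEq, Nat.testBit_two_pow_sub_one] at hbit
        simp [hw] at hbit
      exact ih (.step w (by omega) hab hw hbit he)

-- membership after A's inner w-loop
theorem pvMem_dpW (e : Nat → Nat → Bool) (mask v : Nat) (l : List Nat) :
    ∀ (dp : PySem.Set (Nat × Nat)) (x : Nat × Nat),
      (x ∈ l.foldl (fun dp w =>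
          if mask.testBit w then dp
          else if e v w then PySem.Set.add dp (mask ||| 2 ^ w, w)
          else dp) dp
        ↔ x ∈ dp ∨ ∃ w ∈ l, mask.testBit w = false ∧ e v w = true ∧ x = (mask ||| 2 ^ w, w)) := by
  induction l with
  | nil => simp
  | cons w l ih =>
      intro dp x
      simp only [List.foldl_cons]
      by_cases hb : mask.testBit w
      · rw [if_pos hb, ih]
        constructor
        · rintro (h | ⟨w', hw', hp⟩)
          · exact Or.inl h
          · exact Or.inr ⟨w', List.mem_cons_of_mem _ hw', hp⟩
        · rintro (h | ⟨w', hw', hb', hp⟩)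
          · exact Or.inl h
          · rcases List.mem_cons.mp hw' with rfl | hw'
            · rw [hb] at hb'; exact absurd hb' (by simp)
            · exact Or.inr ⟨w', hw', hb', hp⟩
      · rw [if_neg hb]
        by_cases he : e v w
        · rw [if_pos he, ih]
          constructor
          · rintro (h | ⟨w', hw', hp⟩)
            · rcases (PySem.Set.mem_add _ _ _).mp h with h | h
              · exact Or.inl h
              · exact Or.inr ⟨w, List.mem_cons_self .., by simpa using hb, he, h⟩
            · exact Or.inr ⟨w', List.mem_cons_of_mem _ hw', hp⟩
          · rintro (h | ⟨w', hw', hb', he', hp⟩)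
            · exact Or.inl ((PySem.Set.mem_add _ _ _).mpr (Or.inl h))
            · rcases List.mem_cons.mp hw' with rfl | hw'
              · exact Or.inl ((PySem.Set.mem_add _ _ _).mpr (Or.inr hp))
              · exact Or.inr ⟨w', hw', hb', he', hp⟩
        · rw [if_neg he, ih]
          constructor
          · rintro (h | ⟨w', hw', hp⟩)
            · exact Or.inl h
            · exact Or.inr ⟨w', List.mem_cons_of_mem _ hw', hp⟩
          · rintro (h | ⟨w', hw', hb', he', hp⟩)
            · exact Or.inl h
            · rcases List.mem_cons.mp hw' with rfl | hw'
              · exact absurd he' (by simpa using he)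
              · exact Or.inr ⟨w', hw', hb', he', hp⟩

-- the w-loop never changes which pairs with first component 'mask' are present
theorem pvDpW_mask_stable (e : Nat → Nat → Bool) (k mask v : Nat)
    (dp : PySem.Set (Nat × Nat)) (v' : Nat) :
    ((mask, v') ∈ pvDpW e k mask v dp ↔ (mask, v') ∈ dp) := by
  rw [pvDpW, pvMem_dpW]
  constructor
  · rintro (h | ⟨w, hw, hb, he, hp⟩)
    · exact h
    · exfalso
      have hfst : mask = mask ||| 2 ^ w := congrArg Prod.fst hp
      exact absurd hfst (Nat.ne_of_lt (pvLt_or_pow hb))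
  · exact Or.inl

-- membership after A's middle v-loop
theorem pvMem_dpV (e : Nat → Nat → Bool) (k mask : Nat) (l : List Nat) :
    ∀ (dp : PySem.Set (Nat × Nat)) (x : Nat × Nat),
      (x ∈ l.foldl (fun dp v =>
          if ¬ mask.testBit v then dp
          else if (mask, v) ∉ dp then dp
          else pvDpW e k mask v dp) dp
        ↔ x ∈ dp ∨ ∃ v ∈ l, mask.testBit v = true ∧ (mask, v) ∈ dp ∧
            ∃ w, w < k ∧ mask.testBit w = false ∧ e v w = true ∧ x = (mask ||| 2 ^ w, w)) := by
  induction l with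
  | nil => simp
  | cons v l ih =>
      intro dp x
      simp only [List.foldl_cons]
      by_cases hbv : mask.testBit v
      · rw [if_neg (by simp [hbv])]
        by_cases hmem : (mask, v) ∈ dp
        · rw [if_neg (by simp [hmem]), ih]
          have hstable := pvDpW_mask_stable e k mask v dp
          have hx : x ∈ pvDpW e k mask v dp ↔ x ∈ dp ∨ ∃ w, w < k ∧ mask.testBit w = false ∧
              e v w = true ∧ x = (mask ||| 2 ^ w, w) := by
            rw [pvDpW, pvMem_dpW]
            simp [List.mem_range]
          constructor
          · rintro (h | ⟨v', hv', hb', hm', hp⟩)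
            · rcases hx.mp h with h | h
              · exact Or.inl h
              · exact Or.inr ⟨v, List.mem_cons_self .., hbv, hmem, h⟩
            · exact Or.inr ⟨v', List.mem_cons_of_mem _ hv', hb', (hstable v').mp hm', hp⟩
          · rintro (h | ⟨v', hv', hb', hm', hp⟩)
            · exact Or.inl (hx.mpr (Or.inl h))
            · rcases List.mem_cons.mp hv' with rfl | hv'
              · exact Or.inl (hx.mpr (Or.inr hp))
              · exact Or.inr ⟨v', hv', hb', (hstable v').mpr hm', hp⟩
        · rw [if_pos (by simp [hmem]), ih]
          constructor
          · rintro (h | ⟨v', hv', hp⟩)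
            · exact Or.inl h
            · exact Or.inr ⟨v', List.mem_cons_of_mem _ hv', hp⟩
          · rintro (h | ⟨v', hv', hb', hm', hp⟩)
            · exact Or.inl h
            · rcases List.mem_cons.mp hv' with rfl | hv'
              · exact absurd hm' hmem
              · exact Or.inr ⟨v', hv', hb', hm', hp⟩
      · rw [if_pos (by simp [hbv]), ih]
        constructor
        · rintro (h | ⟨v', hv', hp⟩)
          · exact Or.inl h
          · exact Or.inr ⟨v', List.mem_cons_of_mem _ hv', hp⟩
        · rintro (h | ⟨v', hv', hb', hm', hp⟩)
          · exact Or.inl h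
          · rcases List.mem_cons.mp hv' with rfl | hv'
            · exact absurd hb' (by simpa using hbv)
            · exact Or.inr ⟨v', hv', hb', hm', hp⟩

theorem pvReachB_succ_iff {e k M m v} (hk : 1 ≤ k) :
    pvReachB e k (M + 1) m v ↔
      pvReachB e k M m v ∨ ∃ v₀, v₀ < k ∧ (M + 1).testBit v₀ = true ∧
        pvReachB e k M (M + 1) v₀ ∧ ∃ w, w < k ∧ (M + 1).testBit w = false ∧
          e v₀ w = true ∧ (m, v) = (M + 1 ||| 2 ^ w, w) := by
  constructor
  · intro h
    induction h with
    | base => exact Or.inl .base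
    | @step m₀ v₀ w hm hr hw hbit he ih =>
        rcases ih with h0 | ⟨v₁, hv₁, hb₁, hr₁, w₁, hw₁, hbw₁, he₁, hx₁⟩
        · rcases Nat.lt_or_ge m₀ (M + 1) with hlt | hge
          · exact Or.inl (.step w (by omega) h0 hw hbit he)
          · have hEq : m₀ = M + 1 := by omega
            rw [hEq] at h0 hbit ⊢
            exact Or.inr ⟨v₀, pvReachB_vlt hk h0, pvReachB_bitv h0, h0, w, hw, hbit, he, rfl⟩
        · exfalso
          have h1 : m₀ = M + 1 ||| 2 ^ w₁ := congrArg Prod.fst hx₁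
          have h2 := pvLt_or_pow hbw₁
          omega
  · rintro (h | ⟨v₀, hv₀, hb₀, hr₀, w, hw, hbw, he, hx⟩)
    · exact pvReachB_mono (Nat.le_succ M) h
    · rw [Prod.mk.injEq] at hx
      rw [hx.1, hx.2]
      exact .step w (le_refl _) (pvReachB_mono (Nat.le_succ M) hr₀) hw hbw he

-- after processing masks 1..M, A's dp holds exactly the source-bounded reachable pairs
theorem pvDpPrefix_mem (e : Nat → Nat → Bool) (k : Nat) (hk : 1 ≤ k) :
    ∀ M m v, ((m, v) ∈ pvDpPrefix e k M ↔ pvReachB e k M m v) := by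
  intro M
  induction M with
  | zero =>
      intro m v
      show (m, v) ∈ PySem.Set.add PySem.Set.empty (1, 0) ↔ _
      rw [PySem.Set.mem_add]
      constructor
      · rintro (h | h)
        · simp [PySem.Set.empty] at h
        · rw [Prod.mk.injEq] at h
          rw [h.1, h.2]; exact .base
      · intro h
        cases h with
        | base => simp
        | @step m₀ v₀ w hm hr hw hbit he =>
            have hb := pvReachB_bit0 hr
            have hz : m₀ = 0 := by omega
            rw [hz] at hb
            simp at hb
  | succ M ih =>
      intro m v
      have hsplit : List.range' 1 (M + 1) = List.range' 1 M ++ [1 + M] := List.range'_1_concat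
      have h1M : 1 + M = M + 1 := by omega
      show (m, v) ∈ (List.range' 1 (M + 1)).foldl _ _ ↔ _
      rw [hsplit, List.foldl_append, h1M]
      simp only [List.foldl_cons, List.foldl_nil]
      have hpref : (List.range' 1 M).foldl
          (fun dp mask => if ¬ mask.testBit 0 then dp else pvDpV e k mask dp)
          (PySem.Set.add PySem.Set.empty (1, 0)) = pvDpPrefix e k M := rfl
      rw [hpref]
      by_cases hodd : (M + 1).testBit 0
      · rw [if_neg (by simp [hodd]), pvDpV, pvMem_dpV, pvReachB_succ_iff hk]
        constructor
        · rintro (h | ⟨v₀, hv₀, hb₀, hm₀, hp⟩)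
          · exact Or.inl ((ih m v).mp h)
          · exact Or.inr ⟨v₀, List.mem_range.mp hv₀, hb₀, (ih _ _).mp hm₀, hp⟩
        · rintro (h | ⟨v₀, hv₀, hb₀, hr₀, hp⟩)
          · exact Or.inl ((ih m v).mpr h)
          · exact Or.inr ⟨v₀, List.mem_range.mpr hv₀, hb₀, (ih _ _).mpr hr₀, hp⟩
      · rw [if_pos (by simpa using hodd), ih, pvReachB_succ_iff hk]
        constructor
        · exact Or.inl
        · rintro (h | ⟨v₀, hv₀, hb₀, hr₀, hp⟩)
          · exact h
          · exact absurd (pvReachB_bit0 hr₀) hodd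

-- a Hamiltonian-cycle completion: from endpoint cur, visit all of rem and close an edge back to 0
inductive pvCyc (e : Nat → Nat → Bool) : Nat → List Nat → Prop where
  | nil {cur : Nat} (h : e cur 0 = true) : pvCyc e cur []
  | cons {cur : Nat} {rem : List Nat} (pre : List Nat) (w : Nat) (suf : List Nat)
      (hsplit : rem = pre ++ w :: suf) (he : e cur w = true)
      (htail : pvCyc e w (pre ++ suf)) : pvCyc e cur rem

theorem pvDfs_nil (e : Nat → Nat → Bool) (cur : Nat) : pvDfs e cur [] = e cur 0 := by
  rw [pvDfs.eq_def]

theorem pvDfs_cons (e : Nat → Nat → Bool) (cur r : Nat) (rs : List Nat) :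
    pvDfs e cur (r :: rs) = pvDfsTry e cur [] (r :: rs) := by
  rw [pvDfs.eq_def]

theorem pvDfsTry_nil (e : Nat → Nat → Bool) (cur : Nat) (pre : List Nat) :
    pvDfsTry e cur pre [] = false := by
  rw [pvDfsTry.eq_def]

theorem pvDfsTry_cons (e : Nat → Nat → Bool) (cur w : Nat) (pre rest : List Nat) :
    pvDfsTry e cur pre (w :: rest) =
      (if e cur w && pvDfs e w (pre ++ rest) then true
       else pvDfsTry e cur (pre ++ [w]) rest) := by
  rw [pvDfsTry.eq_def]

theorem pvDfs_nil_iff (e : Nat → Nat → Bool) (cur : Nat) :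
    (pvDfs e cur [] = true ↔ pvCyc e cur []) := by
  rw [pvDfs_nil]
  constructor
  · exact fun h => .nil h
  · intro h
    cases h with
    | nil h => exact h
    | cons pre w suf hs he htail => exact absurd hs (by simp)

theorem pvDfsTry_iff (e : Nat → Nat → Bool) (n : Nat)
    (H : ∀ rem cur, rem.length ≤ n → (pvDfs e cur rem = true ↔ pvCyc e cur rem)) :
    ∀ suf pre cur, pre.length + suf.length ≤ n + 1 →
      (pvDfsTry e cur pre suf = true ↔
        ∃ pre₂ w suf₂, suf = pre₂ ++ w :: suf₂ ∧ e cur w = true ∧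
          pvCyc e w (pre ++ (pre₂ ++ suf₂))) := by
  intro suf
  induction suf with
  | nil =>
      intro pre cur _
      rw [pvDfsTry_nil]
      constructor
      · intro h; exact absurd h (by simp)
      · rintro ⟨pre₂, w, suf₂, hs, _⟩
        exact absurd hs (by simp)
  | cons w rest ih =>
      intro pre cur hlen
      rw [pvDfsTry_cons]
      have hlen' : pre.length + rest.length ≤ n := by
        rw [List.length_cons] at hlen; omega
      have hdfs : pvDfs e w (pre ++ rest) = true ↔ pvCyc e w (pre ++ rest) :=
        H _ _ (by rw [List.length_append]; omega)
      have hih := ih (pre ++ [w]) cur (by rw [List.length_append]; simp; omega)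
      by_cases h1 : (e cur w && pvDfs e w (pre ++ rest)) = true
      · rw [if_pos h1]
        rcases Bool.and_eq_true_iff.mp h1 with ⟨he, hd⟩
        constructor
        · intro _
          exact ⟨[], w, rest, rfl, he, by simpa using hdfs.mp hd⟩
        · intro _; rfl
      · rw [if_neg h1, hih]
        constructor
        · rintro ⟨pre₂, w', suf₂, hs, he', hc⟩
          refine ⟨w :: pre₂, w', suf₂, by simp [hs], he', ?_⟩
          have hl : pre ++ [w] ++ (pre₂ ++ suf₂) = pre ++ (w :: pre₂ ++ suf₂) := by simp
          rwa [hl] at hc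
        · rintro ⟨pre₂, w', suf₂, hs, he', hc⟩
          cases pre₂ with
          | nil =>
              rw [List.nil_append, List.cons.injEq] at hs
              obtain ⟨hw, hrest⟩ := hs
              subst hw
              subst hrest
              exact absurd (by rw [he', Bool.true_and, hdfs]; simpa using hc) h1
          | cons a pre₂' =>
              rw [List.cons_append, List.cons.injEq] at hs
              refine ⟨pre₂', w', suf₂, hs.2, he', ?_⟩
              have hl : pre ++ (a :: pre₂' ++ suf₂) = pre ++ [a] ++ (pre₂' ++ suf₂) := by simp
              rw [hl, ← hs.1] at hc
              exact hc

theorem pvDfs_iff (e : Nat → Nat → Bool) :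
    ∀ (n : Nat) (rem : List Nat) (cur : Nat), rem.length ≤ n →
      (pvDfs e cur rem = true ↔ pvCyc e cur rem) := by
  intro n
  induction n with
  | zero =>
      intro rem cur h
      have hrem : rem = [] := List.eq_nil_of_length_eq_zero (by omega)
      rw [hrem]
      exact pvDfs_nil_iff e cur
  | succ n ih =>
      intro rem cur h
      cases rem with
      | nil => exact pvDfs_nil_iff e cur
      | cons r rs =>
          rw [pvDfs_cons]
          rw [pvDfsTry_iff e n ih (r :: rs) [] cur (by simpa using h)]
          constructor
          · rintro ⟨pre₂, w, suf₂, hs, he, hc⟩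
            exact .cons pre₂ w suf₂ hs he (by simpa using hc)
          · intro hc
            cases hc with
            | cons pre w suf hs he htail => exact ⟨pre, w, suf, hs, he, by simpa using htail⟩

-- complement characterization for the empty remaining list forces the full mask
theorem pvBridge_nil (e : Nat → Nat → Bool) (k : Nat) (m cur : Nat) (hm : m < 2 ^ k)
    (hch : ∀ w, w ∈ ([] : List Nat) ↔ (w < k ∧ m.testBit w = false)) :
    (pvCyc e cur [] ↔ ∃ v', pvReach e k m cur (2 ^ k - 1) v' ∧ e v' 0 = true) := by
  have hfull : m = 2 ^ k - 1 := by
    apply Nat.eq_of_testBit_eq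
    intro i
    rw [Nat.testBit_two_pow_sub_one]
    by_cases hik : i < k
    · cases htb : m.testBit i with
      | false => exact absurd ((hch i).mpr ⟨hik, htb⟩) (List.not_mem_nil)
      | true => simp [hik]
    · rw [Nat.testBit_lt_two_pow
        (lt_of_lt_of_le hm (Nat.pow_le_pow_right (by norm_num) (le_of_not_gt hik)))]
      simp [hik]
  rw [hfull]
  constructor
  · intro hc
    cases hc with
    | nil h => exact ⟨cur, .refl _ _, h⟩
    | cons pre w suf hs he htail => exact absurd hs (by simp)
  · rintro ⟨v', hr, he0⟩
    have hvc : v' = cur := by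
      cases hr with
      | refl => rfl
      | step w hw hbit he htail =>
          rw [Nat.testBit_two_pow_sub_one] at hbit
          simp [hw] at hbit
    exact .nil (hvc ▸ he0)

-- DFS completions are exactly DP path extensions to the full mask plus the closing edge
theorem pvBridge (e : Nat → Nat → Bool) (k : Nat) :
    ∀ (n : Nat) (rem : List Nat) (m cur : Nat), rem.length ≤ n → m < 2 ^ k → rem.Nodup →
      (∀ w, w ∈ rem ↔ (w < k ∧ m.testBit w = false)) →
      (pvCyc e cur rem ↔ ∃ v', pvReach e k m cur (2 ^ k - 1) v' ∧ e v' 0 = true) := by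
  intro n
  induction n with
  | zero =>
      intro rem m cur hn hm hnd hch
      have hrem : rem = [] := List.eq_nil_of_length_eq_zero (by omega)
      subst hrem
      exact pvBridge_nil e k m cur hm hch
  | succ n ih =>
      intro rem m cur hn hm hnd hch
      cases hrem : rem with
      | nil => exact hrem ▸ pvBridge_nil e k m cur hm (hrem ▸ hch)
      | cons r rs =>
          subst hrem
          -- a common step: from a split rem = pre ++ w :: suf, set up the IH on pre ++ suf
          have hstep : ∀ pre w suf, r :: rs = pre ++ w :: suf →
              (pvCyc e w (pre ++ suf) ↔
                ∃ v', pvReach e k (m ||| 2 ^ w) w (2 ^ k - 1) v' ∧ e v' 0 = true) := by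
            intro pre w suf hs
            have hwmem : w ∈ r :: rs := hs ▸ (by simp)
            obtain ⟨hwk, hwbit⟩ := (hch w).mp hwmem
            have hnd2 : (pre ++ w :: suf).Nodup := hs ▸ hnd
            have hd := List.disjoint_of_nodup_append hnd2
            have hwpre : w ∉ pre := fun hwp => hd hwp (by simp)
            have hwsuf : w ∉ suf := by
              have h2 := hnd2.of_append_right
              rw [List.nodup_cons] at h2
              exact h2.1
            have hnd' : (pre ++ suf).Nodup :=
              (List.Sublist.append_left (List.sublist_cons_self w suf) pre).nodup hnd2
            have hch' : ∀ x, x ∈ pre ++ suf ↔ (x < k ∧ (m ||| 2 ^ w).testBit x = false) := by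
              intro x
              rw [pvTestBit_or_pow]
              constructor
              · intro hx
                have hxmem : x ∈ r :: rs := hs ▸ (by
                  rcases List.mem_append.mp hx with h | h
                  · exact List.mem_append.mpr (Or.inl h)
                  · exact List.mem_append.mpr (Or.inr (List.mem_cons_of_mem _ h)))
                obtain ⟨hxk, hxbit⟩ := (hch x).mp hxmem
                have hxw : x ≠ w := fun hEq => by
                  rcases List.mem_append.mp hx with h | h
                  · exact hwpre (hEq ▸ h)
                  · exact hwsuf (hEq ▸ h)
                simp [hxk, hxbit, hxw]
              · rintro ⟨hxk, hxbit⟩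
                rw [Bool.or_eq_false_iff] at hxbit
                have hxw : x ≠ w := by simpa using hxbit.2
                have hxmem : x ∈ r :: rs := (hch x).mpr ⟨hxk, hxbit.1⟩
                rw [hs] at hxmem
                rcases List.mem_append.mp hxmem with h | h
                · exact List.mem_append.mpr (Or.inl h)
                · rcases List.mem_cons.mp h with h | h
                  · exact absurd h hxw
                  · exact List.mem_append.mpr (Or.inr h)
            have hm' : m ||| 2 ^ w < 2 ^ k :=
              Nat.or_lt_two_pow hm (Nat.pow_lt_pow_right (by norm_num) hwk)
            have hlen : (pre ++ suf).length ≤ n := by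
              have h1 := congrArg List.length hs
              simp only [List.length_append, List.length_cons] at h1 hn ⊢
              omega
            exact ih (pre ++ suf) (m ||| 2 ^ w) w hlen hm' hnd' hch'
          constructor
          · intro hc
            cases hc with
            | cons pre w suf hs he htail =>
                have hwmem : w ∈ r :: rs := hs ▸ (by simp)
                obtain ⟨hwk, hwbit⟩ := (hch w).mp hwmem
                obtain ⟨v', hr', he0⟩ := (hstep pre w suf hs).mp htail
                exact ⟨v', .step w hwk hwbit he hr', he0⟩
          · rintro ⟨v', hr', he0⟩
            cases hr' with
            | refl =>
                have hr : r ∈ r :: rs := by simp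
                obtain ⟨hrk, hrbit⟩ := (hch r).mp hr
                rw [Nat.testBit_two_pow_sub_one] at hrbit
                simp [hrk] at hrbit
            | step w hw hbit he htail =>
                have hwmem : w ∈ r :: rs := (hch w).mpr ⟨hw, hbit⟩
                obtain ⟨pre, suf, hs⟩ := List.mem_iff_append.mp hwmem
                exact .cons pre w suf hs he ((hstep pre w suf hs).mpr ⟨v', htail, he0⟩)

-- per-subset equivalence of the two checkers for k ≥ 2 (used with k ≥ 4)
theorem pvCore (e : Nat → Nat → Bool) (k : Nat) (hk : 2 ≤ k) :
    ((List.range' 1 (k - 1)).any fun v =>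
        decide ((2 ^ k - 1, v) ∈ pvDpPrefix e k (2 ^ k - 1)) && e v 0)
      = pvDfs e 0 (List.range' 1 (k - 1)) := by
  have hk1 : 1 ≤ k := by omega
  have h4 : 4 ≤ 2 ^ k := by
    calc (4 : Nat) = 2 ^ 2 := by norm_num
    _ ≤ 2 ^ k := Nat.pow_le_pow_right (by norm_num) hk
  have hch : ∀ w, w ∈ List.range' 1 (k - 1) ↔ (w < k ∧ (1 : Nat).testBit w = false) := by
    intro w
    rw [List.mem_range'_1, pvTestBit_one]
    constructor
    · intro h; exact ⟨by omega, by simp; omega⟩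
    · rintro ⟨h1, h2⟩
      simp at h2
      omega
  have hR : pvDfs e 0 (List.range' 1 (k - 1)) = true ↔
      ∃ v', pvReach e k 1 0 (2 ^ k - 1) v' ∧ e v' 0 = true := by
    rw [pvDfs_iff e (List.range' 1 (k - 1)).length _ _ le_rfl]
    exact pvBridge e k (List.range' 1 (k - 1)).length _ 1 0 le_rfl
      (Nat.one_lt_two_pow (by omega)) (List.nodup_range' 1) hch
  have hL : ((List.range' 1 (k - 1)).any fun v =>
      decide ((2 ^ k - 1, v) ∈ pvDpPrefix e k (2 ^ k - 1)) && e v 0) = true ↔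
      ∃ v', pvReach e k 1 0 (2 ^ k - 1) v' ∧ e v' 0 = true := by
    rw [List.any_eq_true]
    constructor
    · rintro ⟨v, hv, hp⟩
      rcases Bool.and_eq_true_iff.mp hp with ⟨hd, he0⟩
      have hmem := of_decide_eq_true hd
      exact ⟨v, pvReachB_toReach ((pvDpPrefix_mem e k hk1 _ _ _).mp hmem), he0⟩
    · rintro ⟨v', hr, he0⟩
      have hB : pvReachB e k (2 ^ k - 1) (2 ^ k - 1) v' :=
        pvReach_toReachB hk1 (by omega) hr .base
      have hvk : v' < k := pvReachB_vlt hk1 hB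
      have hv0 : v' ≠ 0 := pvReachB_ne_zero hB (by omega)
      refine ⟨v', List.mem_range'_1.mpr ⟨by omega, by omega⟩, ?_⟩
      rw [Bool.and_eq_true_iff]
      exact ⟨decide_eq_true ((pvDpPrefix_mem e k hk1 _ _ _).mpr hB), he0⟩
  exact Bool.coe_iff_coe.mp (hL.trans hR.symm)

theorem pvHam_eq (A : List (List Int)) (verts : List Int) (h3 : 3 ≤ verts.length) :
    pvHamDP A verts = pvHamDFS A verts := by
  unfold pvHamDP pvHamDFS
  by_cases h : verts.length == 3
  · rw [if_pos h, if_pos h]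
  · rw [if_neg h, if_neg h]
    exact pvCore (pvEdge A verts) verts.length (by omega)

theorem pv_outer (A : List (List Int)) (p : Int) (mk : Option Int) :
    enumerate_cycle_vertex_sets A p mk = enumerate_cycle_vertex_sets_alt A p mk := by
  unfold enumerate_cycle_vertex_sets enumerate_cycle_vertex_sets_alt
  apply List.map_congr_left
  intro k hkmem
  have hk3 : (3 : Int) ≤ k :=
    ((PySem.List.mem_pyRange_iff_of_pos (by norm_num) k).mp hkmem).1
  refine congrArg (Prod.mk k) ?_
  apply List.foldl_ext
  intro acc subset hsub
  have hlen := PySem.List.length_of_mem_combinations hsub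
  have hham : pvHamDP A subset = pvHamDFS A subset :=
    pvHam_eq A subset (by rw [hlen]; omega)
  rw [hham]

-- ===== VERDICT (by name: the statement is the Claim_ definition above) =====
theorem enumerate_cycle_vertex_sets_spec : Claim_equal_enumerate_cycle_vertex_sets := by
  intro A p max_k _ _
  unfold Spec_enumerate_cycle_vertex_sets
  exact pv_outer A p max_k
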